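-- pv_equiv track=rewrite | github.com/triompheloro/Shortest-Path | pythonProject/Fonction_Algorithme_Optimisation.py | Successeur_Recurssive
-- ===== SOURCE A (Python) =====
-- def Successeur_Recurssive(graphe,origine, chemin_actuel=None):
--     if chemin_actuel is None:
--         chemin_actuel = [origine]
--
--     if origine not in graphe or not graphe[origine]:
--         return chemin_actuel
--     if graphe[origine] == [()]:
--          return
--     for successeur in graphe[origine]:
--         if successeur not in chemin_actuel:
--             chemin_actuel.append(successeur)
--             Successeur_Recurssive(graphe, successeur, chemin_actuel)
--
--     return chemin_actuel
-- ===== SOURCE B (Python) =====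
-- def Successeur_Recurssive(graphe, origine, chemin_actuel=None):
--     if chemin_actuel is None:
--         chemin_actuel = [origine]
--     succs = graphe.get(origine)
--     if not succs:
--         return chemin_actuel
--     if succs == [()]:
--         return None
--     # iterative DFS: explicit stack of successor-iterators replaces the recursion
--     stack = [iter(succs)]
--     while stack:
--         for successeur in stack[-1]:
--             if successeur not in chemin_actuel:
--                 chemin_actuel.append(successeur)
--                 nxt = graphe.get(successeur)
--                 if nxt and nxt != [()]:
--                     stack.append(iter(nxt))
--                 break
--         else:
--             stack.pop()
--     return chemin_actuel
-- ===== Notes on version B (the rewrite author's own statement) =====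
-- stated objective: alternative
-- what changed: Replaces the self-recursive DFS with an iterative while-loop driving an explicit stack of successor-iterators; chemin_actuel doubles as visited set and result exactly as in A.
import Mathlib
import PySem

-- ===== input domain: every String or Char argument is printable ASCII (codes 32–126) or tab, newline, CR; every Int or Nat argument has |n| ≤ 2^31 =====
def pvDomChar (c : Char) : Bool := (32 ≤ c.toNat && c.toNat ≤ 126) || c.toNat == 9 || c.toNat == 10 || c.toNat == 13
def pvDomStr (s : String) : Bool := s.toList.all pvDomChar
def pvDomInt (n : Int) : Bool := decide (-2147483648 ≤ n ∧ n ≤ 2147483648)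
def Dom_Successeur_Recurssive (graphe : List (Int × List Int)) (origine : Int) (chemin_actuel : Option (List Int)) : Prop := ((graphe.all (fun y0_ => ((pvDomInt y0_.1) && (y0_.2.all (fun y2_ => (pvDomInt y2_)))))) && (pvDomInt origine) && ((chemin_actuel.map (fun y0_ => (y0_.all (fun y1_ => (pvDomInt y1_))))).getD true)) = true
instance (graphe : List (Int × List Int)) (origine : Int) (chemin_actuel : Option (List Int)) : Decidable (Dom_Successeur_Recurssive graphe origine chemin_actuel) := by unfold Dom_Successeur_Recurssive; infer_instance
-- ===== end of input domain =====

-- B replaces A's self-recursive DFS by an iterative while-loop over an explicit stack of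
-- successor-iterators (objective: alternative decomposition, same cost). Both A and B mutate a
-- caller-supplied chemin_actuel identically (appending discovered nodes); the equivalence proved
-- here is about the RETURN value. Python's `graphe[origine] == [()]` sentinel branch (returning
-- None) is unreachable under the dict[int, list[int]] typing of this task, so both ports omit it.

-- ===== PORT A =====
-- dict lookup (first match, insertion order), shared by both ports
def pvLookup (g : List (Int × List Int)) (k : Int) : Option (List Int) :=
  (g.find? (fun p => p.1 == k)).map (·.2)

-- termination measure for both ports: number of dict keys not yet on the path
def pvMissing (g : List (Int × List Int)) (path : List Int) : Nat :=
  (g.map Prod.fst).countP (fun k => decide (k ∉ path))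

-- cited by the ports' decreasing_by: the measure is antitone in the path
theorem pvMissing_anti (g : List (Int × List Int)) {path l : List Int} (h : path ⊆ l) :
    pvMissing g l ≤ pvMissing g path := by
  unfold pvMissing
  refine List.countP_mono_left (fun k _ hk => ?_)
  simp only [decide_eq_true_eq] at *
  exact fun hp => hk (h hp)

-- strict-count helper for pvMissing_lt (specific to the ∉-path predicates of these ports)
theorem pvCountP_lt (L path : List Int) (s : Int) (hsmem : s ∈ L) (hs : s ∉ path) :
    L.countP (fun k => decide (k ∉ path ++ [s])) < L.countP (fun k => decide (k ∉ path)) := by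
  induction L with
  | nil => simp at hsmem
  | cons a t ih =>
    have hmono := List.countP_mono_left (l := t)
      (p := fun k => decide (k ∉ path ++ [s])) (q := fun k => decide (k ∉ path))
      (fun k _ hk => by simp only [decide_eq_true_eq, List.mem_append] at *; tauto)
    rw [List.countP_cons, List.countP_cons]
    rcases List.mem_cons.mp hsmem with rfl | hat
    · have h1 : (decide (s ∉ path ++ [s])) = false := by simp
      have h2 : (decide (s ∉ path)) = true := by simpa using hs
      rw [h1, h2]
      simp only [Bool.false_eq_true, if_false, if_true]
      omega
    · have hlt := ih hat
      by_cases hb : (decide (a ∉ path ++ [s])) = true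
      · have hb2 : (decide (a ∉ path)) = true := by
          simp only [decide_eq_true_eq, List.mem_append] at hb ⊢; tauto
        rw [hb, hb2]; omega
      · have hb' : (decide (a ∉ path ++ [s])) = false := by simpa using hb
        rw [hb']
        cases hq : (decide (a ∉ path)) <;>
          simp only [Bool.false_eq_true, if_false, if_true] <;> omega

-- cited by the ports' decreasing_by: appending an unvisited dict KEY strictly shrinks the measure
theorem pvMissing_lt (g : List (Int × List Int)) {path : List Int} {s : Int} {v : List Int}
    (hget : pvLookup g s = some v) (hs : s ∉ path) :
    pvMissing g (path ++ [s]) < pvMissing g path := by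
  have hsmem : s ∈ g.map Prod.fst := by
    unfold pvLookup at hget
    rcases Option.map_eq_some_iff.mp hget with ⟨p, hp, -⟩
    have heq : p.1 = s := by simpa using List.find?_some hp
    exact heq ▸ List.mem_map_of_mem (List.mem_of_find?_eq_some hp)
  unfold pvMissing
  exact pvCountP_lt _ path s hsmem hs

-- the recursive function's body: the `for successeur in graphe[origine]` loop; the recursive
-- call's own base cases (absent key / empty adjacency: it returns at once) are matched here so
-- the termination measure is visible; the subtype component only records path-prefix monotonicity
def pvLoopA (g : List (Int × List Int)) (succs : List Int) (path : List Int) :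
    {l : List Int // path ⊆ l} :=
  match succs with
  | [] => ⟨path, fun _ h => h⟩
  | s :: rest =>
    if hs : s ∈ path then
      pvLoopA g rest path
    else
      match hget : pvLookup g s with
      | none =>
        let r := pvLoopA g rest (path ++ [s])
        ⟨r.val, fun _ h => r.property (List.mem_append_left _ h)⟩
      | some [] =>
        let r := pvLoopA g rest (path ++ [s])
        ⟨r.val, fun _ h => r.property (List.mem_append_left _ h)⟩
      | some (x :: xs) =>
        let inner := pvLoopA g (x :: xs) (path ++ [s])
        let outer := pvLoopA g rest inner.val
        ⟨outer.val, fun _ h => outer.property (inner.property (List.mem_append_left _ h))⟩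
termination_by (pvMissing g path, succs.length)
decreasing_by
  all_goals first
    | exact Prod.Lex.right _ (by simp)
    | exact Prod.Lex.left _ _ (pvMissing_lt g hget hs)
    | exact Prod.Lex.left _ _ (lt_of_le_of_lt (pvMissing_anti g inner.property) (pvMissing_lt g hget hs))
    | (have h1 := pvMissing_anti g (List.subset_append_left path [s])
       rcases lt_or_eq_of_le h1 with h | h
       · exact Prod.Lex.left _ _ h
       · rw [h]; exact Prod.Lex.right _ (by simp))

def Successeur_Recurssive (graphe : List (Int × List Int)) (origine : Int) (chemin_actuel : Option (List Int)) : List Int :=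
  let path := match chemin_actuel with
    | none => [origine]
    | some l => l
  match pvLookup graphe origine with
  | none => path          -- origine not in graphe
  | some [] => path       -- not graphe[origine]
  | some (x :: xs) => (pvLoopA graphe (x :: xs) path).val

-- ===== PORT B =====
-- Source B's while-loop: stack of iterators, head = top of stack; each remaining-successor list is
-- the state of one iterator; pop on exhaustion, push the adjacency of a newly discovered key
def pvStepB (g : List (Int × List Int)) (stack : List (List Int)) (path : List Int) : List Int :=
  match stack with
  | [] => path
  | [] :: rest => pvStepB g rest path                     -- for-else: iterator exhausted, pop
  | (s :: more) :: rest =>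
    if hs : s ∈ path then
      pvStepB g (more :: rest) path                       -- already visited: advance iterator
    else
      match hget : pvLookup g s with
      | some (x :: xs) => pvStepB g ((x :: xs) :: more :: rest) (path ++ [s])  -- append + push
      | some [] => pvStepB g (more :: rest) (path ++ [s])                      -- append, no push
      | none => pvStepB g (more :: rest) (path ++ [s])                         -- append, no push
termination_by (pvMissing g path, (stack.map (fun l => l.length + 1)).sum)
decreasing_by
  all_goals first
    | exact Prod.Lex.right _ (by simp only [List.map_cons, List.sum_cons, List.length_cons]; omega)
    | exact Prod.Lex.left _ _ (pvMissing_lt g hget hs)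
    | (have h1 := pvMissing_anti g (List.subset_append_left path [s])
       rcases lt_or_eq_of_le h1 with h | h
       · exact Prod.Lex.left _ _ h
       · rw [h]; exact Prod.Lex.right _ (by simp only [List.map_cons, List.sum_cons, List.length_cons]; omega))

def Successeur_Recurssive_alt (graphe : List (Int × List Int)) (origine : Int) (chemin_actuel : Option (List Int)) : List Int :=
  let path := match chemin_actuel with
    | none => [origine]
    | some l => l
  match pvLookup graphe origine with
  | none => path
  | some [] => path
  | some (x :: xs) => pvStepB graphe [x :: xs] path

-- ===== PRECONDITION & SPEC =====
def Spec_Successeur_Recurssive (graphe : List (Int × List Int)) (origine : Int) (chemin_actuel : Option (List Int)) (out : List Int) : Prop := out = Successeur_Recurssive_alt graphe origine chemin_actuel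
instance (graphe : List (Int × List Int)) (origine : Int) (chemin_actuel : Option (List Int)) (out : List Int) : Decidable (Spec_Successeur_Recurssive graphe origine chemin_actuel out) := by unfold Spec_Successeur_Recurssive; infer_instance

-- ===== CLAIM (what is proved, stated in full; the proofs are below) =====
def Claim_equal_Successeur_Recurssive : Prop := ∀ (graphe : List (Int × List Int)) (origine : Int) (chemin_actuel : Option (List Int)), Dom_Successeur_Recurssive graphe origine chemin_actuel → Spec_Successeur_Recurssive graphe origine chemin_actuel (Successeur_Recurssive graphe origine chemin_actuel)

-- ===== LEMMAS AND PROOFS =====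

-- the stack invariant: running B's loop with `succs` on top of the stack first performs exactly
-- A's for-loop over `succs` (growing the path the same way), then continues with the rest
theorem pvStepB_eq_pvLoopA (g : List (Int × List Int)) (succs path : List Int)
    (rest : List (List Int)) :
    pvStepB g (succs :: rest) path = pvStepB g rest (pvLoopA g succs path).val := by
  match succs with
  | [] =>
    rw [pvStepB, pvLoopA]
  | s :: tl =>
    rw [pvStepB, pvLoopA]
    by_cases hs : s ∈ path
    · simp only [hs, dite_true]
      exact pvStepB_eq_pvLoopA g tl path rest
    · simp only [hs, dite_false]
      cases hget : pvLookup g s with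
      | none =>
        exact pvStepB_eq_pvLoopA g tl (path ++ [s]) rest
      | some v =>
        cases v with
        | nil =>
          exact pvStepB_eq_pvLoopA g tl (path ++ [s]) rest
        | cons x xs =>
          show pvStepB g ((x :: xs) :: tl :: rest) (path ++ [s]) =
            pvStepB g rest (pvLoopA g tl (pvLoopA g (x :: xs) (path ++ [s])).val).val
          rw [pvStepB_eq_pvLoopA g (x :: xs) (path ++ [s]) (tl :: rest)]
          exact pvStepB_eq_pvLoopA g tl (pvLoopA g (x :: xs) (path ++ [s])).val rest
termination_by (pvMissing g path, succs.length)
decreasing_by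
  all_goals first
    | exact Prod.Lex.right _ (by simp)
    | exact Prod.Lex.left _ _ (pvMissing_lt g hget hs)
    | exact Prod.Lex.left _ _ (lt_of_le_of_lt (pvMissing_anti g (pvLoopA g (x :: xs) (path ++ [s])).property) (pvMissing_lt g hget hs))
    | (have h1 := pvMissing_anti g (List.subset_append_left path [s])
       rcases lt_or_eq_of_le h1 with h | h
       · exact Prod.Lex.left _ _ h
       · rw [h]; exact Prod.Lex.right _ (by simp))

-- ===== VERDICT (by name: the statement is the Claim_ definition above) =====
theorem Successeur_Recurssive_spec : Claim_equal_Successeur_Recurssive := by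
  intro graphe origine chemin_actuel _
  unfold Spec_Successeur_Recurssive Successeur_Recurssive Successeur_Recurssive_alt
  cases hget : pvLookup graphe origine with
  | none => rfl
  | some v =>
    cases v with
    | nil => rfl
    | cons x xs =>
      simp only []
      rw [pvStepB_eq_pvLoopA, pvStepB]
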